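-- pv_equiv track=rewrite | github.com/nabakirov/TicketGenerator | exam/login/security.py | hashCompare
-- ===== SOURCE A (Python) =====
-- def hashCompare(hash1, hash2):
--     if len(hash1) != len(hash2):
--         raise ValueError('Hashes seem to be different lengths')
--     identical = True
--     for index in range(0, len(hash1)):
--         if hash1[index] != hash2[index]:
--             identical = False
--     return identical
-- ===== SOURCE B (Python) =====
-- def hashCompare(hash1, hash2):
--     if len(hash1) != len(hash2):
--         raise ValueError('Hashes seem to be different lengths')
--     return hash1 == hash2
-- ===== Notes on version B (the rewrite author's own statement) =====
-- stated objective: simpler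
-- what changed: Keeps the equal-length guard but replaces the index loop with its 'identical' flag by a single built-in whole-string equality comparison.
import Mathlib
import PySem

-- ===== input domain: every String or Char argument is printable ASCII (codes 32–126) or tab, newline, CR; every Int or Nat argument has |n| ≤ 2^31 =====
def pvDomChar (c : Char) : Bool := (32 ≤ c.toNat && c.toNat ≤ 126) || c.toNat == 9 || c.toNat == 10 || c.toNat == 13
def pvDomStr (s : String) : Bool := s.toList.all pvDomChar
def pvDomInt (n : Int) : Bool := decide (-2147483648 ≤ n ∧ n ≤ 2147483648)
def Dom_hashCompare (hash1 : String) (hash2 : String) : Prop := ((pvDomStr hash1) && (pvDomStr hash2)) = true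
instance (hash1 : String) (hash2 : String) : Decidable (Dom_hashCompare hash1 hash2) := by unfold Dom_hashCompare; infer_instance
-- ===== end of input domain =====

-- B replaces A's index loop and flag by one whole-string equality; the equal-length guard (ValueError) is kept, so Pre_ excludes unequal lengths for both.

-- ===== PORT A =====
-- the length guard raises outside Pre_; inside Pre_ the loop runs over range(0, len(hash1))
def hashCompare (hash1 : String) (hash2 : String) : Bool :=
  (PySem.List.pyRange 0 (PySem.Str.len hash1) 1).foldl
    (fun identical index =>
      if PySem.Str.pyGet? hash1 index ≠ PySem.Str.pyGet? hash2 index then false else identical)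
    true

-- ===== PORT B =====
def hashCompare_alt (hash1 : String) (hash2 : String) : Bool :=
  hash1 == hash2

-- ===== PRECONDITION & SPEC =====
-- A (and B) raise ValueError when the lengths differ; Pre_ excludes exactly those inputs.
def Pre_hashCompare (hash1 : String) (hash2 : String) : Prop :=
  PySem.Str.len hash1 = PySem.Str.len hash2
instance (hash1 : String) (hash2 : String) : Decidable (Pre_hashCompare hash1 hash2) := by unfold Pre_hashCompare; infer_instance
def pvWitness_hashCompare : String × String := ("abc1", "abd1")

def Spec_hashCompare (hash1 : String) (hash2 : String) (out : Bool) : Prop := out = hashCompare_alt hash1 hash2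
instance (hash1 : String) (hash2 : String) (out : Bool) : Decidable (Spec_hashCompare hash1 hash2 out) := by unfold Spec_hashCompare; infer_instance

-- ===== CLAIM (what is proved, stated in full; the proofs are below) =====
def Claim_equal_hashCompare : Prop := ∀ (hash1 : String) (hash2 : String), Dom_hashCompare hash1 hash2 → Pre_hashCompare hash1 hash2 → Spec_hashCompare hash1 hash2 (hashCompare hash1 hash2)

-- ===== LEMMAS AND PROOFS =====

-- A's loop shape: the flag only ever goes to false, so the fold is an 'all' of the negated test.
theorem foldl_flag_all {α : Type} (p : α → Prop) [DecidablePred p] (xs : List α) (acc : Bool) :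
    xs.foldl (fun identical x => if p x then false else identical) acc
      = (acc && xs.all (fun x => decide ¬ p x)) := by
  induction xs generalizing acc with
  | nil => simp
  | cons x xs ih =>
    simp only [List.foldl_cons, List.all_cons, ih]
    by_cases h : p x <;> simp [h]

theorem hashCompare_spec : Claim_equal_hashCompare := by
  intro hash1 hash2 _ hpre
  unfold Spec_hashCompare hashCompare hashCompare_alt
  rw [foldl_flag_all]
  unfold Pre_hashCompare at hpre
  simp only [PySem.Str.len_eq] at hpre ⊢
  simp only [Bool.true_and]
  rw [show (hash1 == hash2) = (hash1.toList == hash2.toList) by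
        cases hash1; cases hash2; simp [String.ext_iff]]
  rcases h : (hash1.toList == hash2.toList) with _ | _
  · -- lists differ: some index in range witnesses a mismatch
    rw [beq_eq_false_iff_ne] at h
    rw [List.all_eq_false]
    have hne : ∃ k : Nat, k < hash1.toList.length ∧ hash1.toList[k]? ≠ hash2.toList[k]? := by
      by_contra hc
      push Not at hc
      apply h
      apply List.ext_getElem?
      intro n
      by_cases hn : n < hash1.toList.length
      · exact hc n hn
      · rw [List.getElem?_eq_none (by omega), List.getElem?_eq_none (by omega)]
    obtain ⟨k, hk, hkne⟩ := hne
    refine ⟨(k : Int), ?_, ?_⟩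
    · rw [PySem.List.mem_pyRange_one]
      constructor <;> [positivity; exact_mod_cast hk]
    · simp [hkne]
  · -- lists equal: every index agrees
    rw [beq_iff_eq] at h
    rw [List.all_eq_true]
    intro i hi
    rw [PySem.List.mem_pyRange_one] at hi
    obtain ⟨hi0, _⟩ := hi
    obtain ⟨n, rfl⟩ := Int.eq_ofNat_of_zero_le hi0
    simp [h]
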